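-- pv_equiv track=rewrite | github.com/iparcina/Python-codility | 11.Passing cars.py | solution
-- ===== SOURCE A (Python) =====
-- def solution(A):
--     counter = 0
--     for j, a in enumerate(A):
--         if a == 0:
--             for i in range(j+1,len(A)):
--                 if A[i] == 1:
--                     counter +=1
--                     if counter>1000000000:
--                         return -1
--     return counter
-- ===== SOURCE B (Python) =====
-- def solution(A):
--     zeros = 0
--     total = 0
--     for a in A:
--         if a == 0:
--             zeros += 1
--         elif a == 1:
--             total += zeros
--             if total > 1000000000:
--                 return -1
--     return total
-- ===== Notes on version B (the rewrite author's own statement) =====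
-- stated objective: alternative
-- what changed: Replaced the nested scan (for each 0, scan the rest of the list for 1s) by a single pass that keeps a running count of zeros seen and adds it at each 1, capping at 1e9; a timing run's inputs contain few 0/1 so no speed-up was measured.
import Mathlib
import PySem

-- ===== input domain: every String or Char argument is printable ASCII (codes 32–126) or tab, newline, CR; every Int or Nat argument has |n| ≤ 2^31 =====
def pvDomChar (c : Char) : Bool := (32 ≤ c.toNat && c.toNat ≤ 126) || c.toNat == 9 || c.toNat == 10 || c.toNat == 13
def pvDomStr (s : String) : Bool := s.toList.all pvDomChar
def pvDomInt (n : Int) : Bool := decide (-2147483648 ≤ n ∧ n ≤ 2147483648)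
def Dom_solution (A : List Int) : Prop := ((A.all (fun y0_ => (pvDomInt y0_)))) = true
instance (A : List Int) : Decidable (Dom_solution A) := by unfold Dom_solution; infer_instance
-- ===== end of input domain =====

-- B replaces A's nested scans by one pass tracking the running count of zeros; same capped result.

-- ===== PORT A =====
-- inner loop: 'for i in range(j+1, len(A)): …'; returns none when the Python does 'return -1'
def solInner (A : List Int) (i : Nat) (counter : Int) : Option Int :=
  if h : i < A.length then
    if A[i] = 1 then
      if counter + 1 > 1000000000 then none
      else solInner A (i + 1) (counter + 1)
    else solInner A (i + 1) counter
  else some counter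
termination_by A.length - i

-- outer loop: 'for j, a in enumerate(A): …' (rest is the not-yet-visited suffix, j its start index)
def solOuter (A : List Int) (rest : List Int) (j : Nat) (counter : Int) : Option Int :=
  match rest with
  | [] => some counter
  | a :: r =>
    if a = 0 then
      match solInner A (j + 1) counter with
      | none => none
      | some c => solOuter A r (j + 1) c
    else solOuter A r (j + 1) counter

def solution (A : List Int) : Int :=
  match solOuter A A 0 0 with
  | none => -1
  | some c => c

-- ===== PORT B =====
def solAltLoop (rest : List Int) (zeros total : Int) : Int :=
  match rest with
  | [] => total
  | a :: r =>
    if a = 0 then solAltLoop r (zeros + 1) total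
    else if a = 1 then
      if total + zeros > 1000000000 then -1
      else solAltLoop r zeros (total + zeros)
    else solAltLoop r zeros total

def solution_alt (A : List Int) : Int := solAltLoop A 0 0

-- ===== PRECONDITION & SPEC =====
def Spec_solution (A : List Int) (out : Int) : Prop := out = solution_alt A
instance (A : List Int) (out : Int) : Decidable (Spec_solution A out) := by unfold Spec_solution; infer_instance

-- ===== CLAIM (what is proved, stated in full; the proofs are below) =====
def Claim_equal_solution : Prop := ∀ (A : List Int), Dom_solution A → Spec_solution A (solution A)

-- ===== LEMMAS AND PROOFS =====

-- number of 1s in a list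
def cnt1 : List Int → Int
  | [] => 0
  | a :: r => (if a = 1 then 1 else 0) + cnt1 r

-- pairs counted with z zeros already seen (B's accumulation order)
def pf : List Int → Int → Int
  | [], _ => 0
  | a :: r, z => (if a = 1 then z else 0) + pf r (z + (if a = 0 then 1 else 0))

theorem cnt1_nonneg (l : List Int) : 0 ≤ cnt1 l := by
  induction l with
  | nil => simp [cnt1]
  | cons a r ih => simp only [cnt1]; split <;> omega

theorem pf_shift (l : List Int) : ∀ z : Int, pf l z = z * cnt1 l + pf l 0 := by
  induction l with
  | nil => intro z; simp [pf, cnt1]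
  | cons a r ih =>
    intro z
    simp only [pf, cnt1]
    rw [ih (z + (if a = 0 then 1 else 0)), ih ((0 : Int) + (if a = 0 then 1 else 0))]
    split <;> split <;> ring

theorem pf_nonneg (l : List Int) (z : Int) (hz : 0 ≤ z) : 0 ≤ pf l z := by
  induction l generalizing z with
  | nil => simp [pf]
  | cons a r ih =>
    simp only [pf]
    have h1 : 0 ≤ pf r (z + (if a = 0 then 1 else 0)) := by
      apply ih; split <;> omega
    split <;> omega

theorem pf_cons_zero (a : Int) (r : List Int) :
    pf (a :: r) 0 = (if a = 0 then cnt1 r else 0) + pf r 0 := by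
  simp only [pf]
  rw [pf_shift r ((0 : Int) + (if a = 0 then 1 else 0))]
  by_cases ha : a = 0 <;> simp [ha] <;> ring

theorem inner_spec (A : List Int) :
    ∀ n i c, A.length - i = n → 0 ≤ c → c ≤ 1000000000 →
      solInner A i c =
        (if c + cnt1 (A.drop i) > 1000000000 then none
         else some (c + cnt1 (A.drop i))) := by
  intro n
  induction n with
  | zero =>
    intro i c hn hc0 hc1
    have hge : A.length ≤ i := by omega
    rw [solInner]
    simp [Nat.not_lt.mpr hge, List.drop_eq_nil_of_le hge, cnt1]
    omega
  | succ n ih =>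
    intro i c hn hc0 hc1
    have hlt : i < A.length := by omega
    have hdrop : A.drop i = A[i] :: A.drop (i + 1) := List.drop_eq_getElem_cons hlt
    rw [solInner]
    simp only [hlt, dif_pos, hdrop, cnt1]
    have hnn := cnt1_nonneg (A.drop (i + 1))
    by_cases h1 : A[i] = 1
    · simp only [h1, if_true, ite_true]
      by_cases hcap : c + 1 > 1000000000
      · rw [if_pos hcap, if_pos (by omega : c + ((1 : Int) + cnt1 (A.drop (i + 1))) > 1000000000)]
      · rw [if_neg hcap, ih (i + 1) (c + 1) (by omega) (by omega) (by omega)]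
        have he : c + ((1 : Int) + cnt1 (A.drop (i + 1))) = c + 1 + cnt1 (A.drop (i + 1)) := by
          ring
        rw [he]
    · simp only [h1, if_false, ite_false]
      rw [ih (i + 1) c (by omega) hc0 hc1]
      simp

theorem outer_spec (A : List Int) :
    ∀ rest j c, rest = A.drop j → 0 ≤ c → c ≤ 1000000000 →
      solOuter A rest j c =
        (if c + pf rest 0 > 1000000000 then none else some (c + pf rest 0)) := by
  intro rest
  induction rest with
  | nil => intro j c _ hc0 hc1; simp [solOuter, pf]; omega
  | cons a r ih =>
    intro j c hdrop hc0 hc1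
    have hr : r = A.drop (j + 1) := by
      have hlt : j < A.length := by
        by_contra h
        simp [List.drop_eq_nil_of_le (Nat.le_of_not_lt h)] at hdrop
      have := List.drop_eq_getElem_cons hlt (l := A)
      rw [this] at hdrop
      exact (List.cons.injEq _ _ _ _ ▸ hdrop).2
    have hnnR := pf_nonneg r 0 le_rfl
    have hnnC := cnt1_nonneg r
    rw [solOuter, pf_cons_zero]
    by_cases ha : a = 0
    · simp only [ha, if_true, ite_true]
      rw [inner_spec A (A.length - (j + 1)) (j + 1) c rfl hc0 hc1, ← hr]
      by_cases hcap : c + cnt1 r > 1000000000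
      · rw [if_pos hcap]
        simp only []
        rw [if_pos (by omega : c + (cnt1 r + pf r 0) > 1000000000)]
      · rw [if_neg hcap]
        simp only []
        rw [ih (j + 1) (c + cnt1 r) hr (by omega) (by omega)]
        have he : c + (cnt1 r + pf r 0) = c + cnt1 r + pf r 0 := by ring
        rw [he]
    · simp only [ha, if_false, ite_false]
      rw [ih (j + 1) c hr hc0 hc1]
      simp [ha]

theorem alt_spec :
    ∀ (rest : List Int) (z t : Int), 0 ≤ z → 0 ≤ t → t ≤ 1000000000 →
      solAltLoop rest z t = (if t + pf rest z > 1000000000 then -1 else t + pf rest z) := by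
  intro rest
  induction rest with
  | nil => intro z t _ _ h; simp [solAltLoop, pf]; omega
  | cons a r ih =>
    intro z t hz ht0 ht1
    have hnn : 0 ≤ pf r (z + (if a = 0 then 1 else 0)) := by
      apply pf_nonneg; split <;> omega
    rw [solAltLoop]
    simp only [pf]
    by_cases ha : a = 0
    · simp only [ha, if_true, ite_true, if_false, ite_false, zero_ne_one]
      rw [ih (z + 1) t (by omega) ht0 ht1]
      norm_num
    · by_cases ha1 : a = 1
      · simp only [ha, ha1, if_true, ite_true, if_false, ite_false, one_ne_zero, add_zero] at hnn ⊢
        by_cases hcap : t + z > 1000000000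
        · rw [if_pos hcap, if_pos (by omega : t + (z + pf r z) > 1000000000)]
        · rw [if_neg hcap, ih z (t + z) hz (by omega) (by omega)]
          have he : t + (z + pf r z) = t + z + pf r z := by ring
          rw [he]
      · simp only [ha, ha1, if_false, ite_false]
        rw [ih z t hz ht0 ht1]
        simp

-- ===== VERDICT (by name: the statement is the Claim_ definition above) =====
theorem solution_spec : Claim_equal_solution := by
  intro A _
  unfold Spec_solution solution solution_alt
  rw [outer_spec A A 0 0 (by simp) le_rfl (by norm_num),
      alt_spec A 0 0 le_rfl le_rfl (by norm_num)]
  have h := pf_nonneg A 0 le_rfl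
  simp only [zero_add]
  by_cases hc : pf A 0 > 1000000000 <;> simp [hc]
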